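-- pv_equiv track=rewrite | github.com/super999/gd_qmt_cx | code/run_qmt/intraday_monitor_gui.py | _event_count_text
-- ===== SOURCE A (Python) =====
-- def _event_count_text(rows):
--     if not rows:
--         return "事件数量：0"
--     counts = {}
--     for row in rows:
--         label = row.get("event_label", "") or row.get("event_type", "")
--         counts[label] = counts.get(label, 0) + 1
--     parts = ["{} {}".format(label, count) for label, count in sorted(counts.items())]
--     return "事件数量：{}；{}".format(len(rows), "，".join(parts))
-- ===== SOURCE B (Python) =====
-- def _event_count_text(rows):
--     labels = sorted(row.get("event_label", "") or row.get("event_type", "") for row in rows)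
--     if not labels:
--         return "事件数量：0"
--     parts = []
--     i, n = 0, len(labels)
--     while i < n:
--         j = i
--         while j < n and labels[j] == labels[i]:
--             j += 1
--         parts.append("{} {}".format(labels[i], j - i))
--         i = j
--     return "事件数量：{}；{}".format(n, "，".join(parts))
-- ===== Notes on version B (the rewrite author's own statement) =====
-- stated objective: alternative
-- what changed: Replaces the hash-count dictionary (build counts dict, then sort its items) by sort-then-scan: extract all labels, sort them once, and emit each run's label with its run length in one pass over the sorted list.
import Mathlib
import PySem

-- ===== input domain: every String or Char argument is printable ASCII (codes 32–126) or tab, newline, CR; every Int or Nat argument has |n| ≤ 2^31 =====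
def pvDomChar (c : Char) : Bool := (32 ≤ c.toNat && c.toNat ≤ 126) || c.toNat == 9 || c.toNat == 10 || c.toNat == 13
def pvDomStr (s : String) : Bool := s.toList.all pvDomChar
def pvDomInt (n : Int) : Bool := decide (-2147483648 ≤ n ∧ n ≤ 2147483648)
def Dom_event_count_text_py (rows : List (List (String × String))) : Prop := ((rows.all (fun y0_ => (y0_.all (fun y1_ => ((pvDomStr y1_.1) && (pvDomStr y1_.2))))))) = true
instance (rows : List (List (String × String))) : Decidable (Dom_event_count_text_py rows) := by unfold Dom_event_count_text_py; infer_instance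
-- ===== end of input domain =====

-- B replaces A's hash-count dictionary by sort-then-scan over the label list (alternative decomposition, same result).

-- ===== PORT A =====
-- shared helper: row.get("event_label", "") or row.get("event_type", "")  (both Pythons use this exact expression)
def pvLabel (row : List (String × String)) : String :=
  if (PySem.Dict.getD (PySem.Dict.mk row) "event_label" "") == "" then
    PySem.Dict.getD (PySem.Dict.mk row) "event_type" ""
  else
    PySem.Dict.getD (PySem.Dict.mk row) "event_label" ""

def event_count_text_py (rows : List (List (String × String))) : String :=
  if rows = [] then "事件数量：0"
  else
    "事件数量：" ++ PySem.Int.toStr (rows.length : Int) ++ "；" ++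
      PySem.Str.join "，"
        ((PySem.List.sorted2
            (rows.foldl
              (fun d row => d.insert (pvLabel row) (d.getD (pvLabel row) 0 + 1))
              (PySem.Dict.empty : PySem.Dict String Int)).items
            (fun kc => kc.1) (fun kc => kc.2)).map
          (fun kc => kc.1 ++ " " ++ PySem.Int.toStr kc.2))

-- ===== PORT B =====
-- the run-length scan over the sorted label list (the two nested while loops of Source B)
def pvRuns : List String → List String
  | [] => []
  | x :: t =>
    (x ++ " " ++ PySem.Int.toStr (((t.takeWhile (fun y => y == x)).length : Int) + 1))
      :: pvRuns (t.dropWhile (fun y => y == x))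
termination_by S => S.length
decreasing_by
  have h := List.length_dropWhile_le (p := fun y => y == x) (l := t)
  simp only [List.length_cons]
  omega

def event_count_text_py_alt (rows : List (List (String × String))) : String :=
  if PySem.List.sorted (rows.map pvLabel) (fun x => x) = [] then "事件数量：0"
  else
    "事件数量：" ++
      PySem.Int.toStr ((PySem.List.sorted (rows.map pvLabel) (fun x => x)).length : Int) ++
      "；" ++
      PySem.Str.join "，" (pvRuns (PySem.List.sorted (rows.map pvLabel) (fun x => x)))

-- ===== PRECONDITION & SPEC =====
def Spec_event_count_text_py (rows : List (List (String × String))) (out : String) : Prop := out = event_count_text_py_alt rows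
instance (rows : List (List (String × String))) (out : String) : Decidable (Spec_event_count_text_py rows out) := by unfold Spec_event_count_text_py; infer_instance

-- ===== CLAIM (what is proved, stated in full; the proofs are below) =====
def Claim_equal_event_count_text_py : Prop := ∀ (rows : List (List (String × String))), Dom_event_count_text_py rows → Spec_event_count_text_py rows (event_count_text_py rows)

-- ===== LEMMAS AND PROOFS =====

-- the lexicographic tuple comparison sorted2 uses on (label, count) pairs
def pvLex (a b : String × Int) : Bool :=
  decide (a.1 < b.1) || (!decide (b.1 < a.1) && decide (a.2 < b.2))

theorem pvLex_sorted2_eq (xs : List (String × Int)) :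
    PySem.List.sorted2 xs (fun kc => kc.1) (fun kc => kc.2) =
      xs.foldl (fun acc x => PySem.List.insertBy pvLex x acc) [] := rfl

theorem insertBy_nil {α : Type} (before : α → α → Bool) (x : α) :
    PySem.List.insertBy before x [] = [x] := rfl

theorem insertBy_cons {α : Type} (before : α → α → Bool) (x y : α) (ys : List α) :
    PySem.List.insertBy before x (y :: ys) =
      if before x y then x :: y :: ys else y :: PySem.List.insertBy before x ys := rfl

theorem pvLex_insertBy_pairwise (x : String × Int) (ys : List (String × Int))
    (h : ys.Pairwise (fun a b => a.1 ≤ b.1)) :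
    (PySem.List.insertBy pvLex x ys).Pairwise (fun a b => a.1 ≤ b.1) := by
  induction ys with
  | nil => simp [insertBy_nil]
  | cons y ys ih =>
    rw [insertBy_cons]
    rcases List.pairwise_cons.mp h with ⟨hy, hys⟩
    by_cases hb : pvLex x y = true
    · simp only [hb, if_true]
      have hxy : x.1 ≤ y.1 := by
        unfold pvLex at hb
        simp only [Bool.or_eq_true, Bool.and_eq_true, Bool.not_eq_true', decide_eq_true_eq,
          decide_eq_false_iff_not] at hb
        rcases hb with h1 | ⟨h1, _⟩
        · exact le_of_lt h1
        · exact le_of_not_gt h1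
      refine List.pairwise_cons.mpr ⟨?_, h⟩
      intro z hz
      rcases List.mem_cons.mp hz with rfl | hz
      · exact hxy
      · exact le_trans hxy (hy z hz)
    · simp only [hb, Bool.false_eq_true, if_false]
      have hyx : y.1 ≤ x.1 := by
        unfold pvLex at hb
        simp only [Bool.or_eq_true, Bool.and_eq_true, Bool.not_eq_true', decide_eq_true_eq,
          decide_eq_false_iff_not, not_or, not_and] at hb
        rcases hb with ⟨h1, _⟩
        exact le_of_not_gt h1
      refine List.pairwise_cons.mpr ⟨?_, ih hys⟩
      intro z hz
      rcases (PySem.List.insertBy_mem_iff pvLex x z ys).mp hz with rfl | hz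
      · exact hyx
      · exact hy z hz

theorem pvLex_foldl_pairwise (xs : List (String × Int)) (acc : List (String × Int))
    (h : acc.Pairwise (fun a b => a.1 ≤ b.1)) :
    (xs.foldl (fun acc x => PySem.List.insertBy pvLex x acc) acc).Pairwise
      (fun a b => a.1 ≤ b.1) := by
  induction xs generalizing acc with
  | nil => exact h
  | cons x xs ih => exact ih _ (pvLex_insertBy_pairwise x acc h)

theorem sorted2_fst_pairwise (xs : List (String × Int)) :
    (PySem.List.sorted2 xs (fun kc => kc.1) (fun kc => kc.2)).Pairwise
      (fun a b => a.1 ≤ b.1) := by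
  rw [pvLex_sorted2_eq]
  exact pvLex_foldl_pairwise xs [] (List.Pairwise.nil)

-- pairwise < from pairwise ≤ and nodup (generic)
theorem pairwise_lt_of_le_nodup {α κ : Type} [LinearOrder κ] (key : α → κ) (l : List α)
    (hle : l.Pairwise (fun a b => key a ≤ key b)) (hnd : (l.map key).Nodup) :
    l.Pairwise (fun a b => key a < key b) := by
  have hne : l.Pairwise (fun a b => key a ≠ key b) := (List.pairwise_map).mp hnd
  induction l with
  | nil => exact List.Pairwise.nil
  | cons x t ih =>
    rcases List.pairwise_cons.mp hle with ⟨h1, h2⟩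
    rcases List.pairwise_cons.mp hne with ⟨h3, h4⟩
    refine List.pairwise_cons.mpr ⟨fun z hz => lt_of_le_of_ne (h1 z hz) (h3 z hz), ?_⟩
    exact ih h2 ((List.pairwise_map).mpr h4) h4

-- two strictly key-increasing permutations are equal
theorem eq_of_perm_pairwise_lt {α κ : Type} [LinearOrder κ] (key : α → κ) (l₁ l₂ : List α)
    (hp : l₁.Perm l₂) (h₁ : l₁.Pairwise (fun a b => key a < key b))
    (h₂ : l₂.Pairwise (fun a b => key a < key b)) : l₁ = l₂ := by
  have a1 := PySem.List.sorted_eq_of_perm_of_pairwise_lt l₂ l₁ key hp h₁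
  have a2 := PySem.List.sorted_eq_of_perm_of_pairwise_lt l₂ l₂ key (List.Perm.refl _) h₂
  rw [a1] at a2
  exact a2

-- PySem.Set.ofList xs is a sublist of xs
theorem foldl_add_sublist (xs : List String) : ∀ (acc : List String),
    ∃ ys, xs.foldl PySem.Set.add acc = acc ++ ys ∧ ys.Sublist xs := by
  induction xs with
  | nil => intro acc; exact ⟨[], by simp, List.Sublist.refl _⟩
  | cons x xs ih =>
    intro acc
    by_cases hc : x ∈ acc
    · rcases ih acc with ⟨ys, h1, h2⟩
      refine ⟨ys, ?_, h2.cons x⟩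
      simp only [List.foldl_cons]
      rw [show PySem.Set.add acc x = acc from by simp [PySem.Set.add, hc]]
      exact h1
    · rcases ih (acc ++ [x]) with ⟨ys, h1, h2⟩
      refine ⟨x :: ys, ?_, h2.cons₂ x⟩
      simp only [List.foldl_cons]
      rw [show PySem.Set.add acc x = acc ++ [x] from by simp [PySem.Set.add, hc]]
      rw [h1, List.append_assoc]
      rfl

theorem ofList_sublist (xs : List String) : (PySem.Set.ofList xs).Sublist xs := by
  rcases foldl_add_sublist xs [] with ⟨ys, h1, h2⟩
  have : PySem.Set.ofList xs = xs.foldl PySem.Set.add [] := PySem.Set.ofList_eq_foldl xs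
  rw [this, h1]
  simpa using h2

-- sorted(set(L)) = set(sorted(L))
theorem sorted_ofList_eq_ofList_sorted (L : List String) :
    PySem.List.sorted (PySem.Set.ofList L) (fun x => x) =
      PySem.Set.ofList (PySem.List.sorted L (fun x => x)) := by
  apply PySem.List.sorted_eq_of_perm_of_pairwise_lt
  · rw [List.perm_ext_iff_of_nodup (PySem.Set.nodup_ofList _) (PySem.Set.nodup_ofList _)]
    intro a
    rw [PySem.Set.mem_ofList, PySem.Set.mem_ofList, PySem.List.mem_sorted]
  · have hle : (PySem.Set.ofList (PySem.List.sorted L (fun x => x))).Pairwise (fun a b => a ≤ b) :=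
      List.Pairwise.sublist (ofList_sublist _) (PySem.List.sorted_pairwise L (fun x => x))
    have hnd : ((PySem.Set.ofList (PySem.List.sorted L (fun x => x))).map (fun x => x)).Nodup := by
      simpa using PySem.Set.nodup_ofList (PySem.List.sorted L (fun x => x))
    exact pairwise_lt_of_le_nodup (fun x => x) _ hle hnd

-- x does not survive dropWhile (== x) on a sorted tail all of whose elements are ≥ x
theorem not_mem_dropWhile_self (x : String) (t : List String)
    (hp : t.Pairwise (· ≤ ·)) (hge : ∀ y ∈ t, x ≤ y) :
    x ∉ t.dropWhile (fun y => y == x) := by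
  induction t with
  | nil => simp
  | cons y t ih =>
    rcases List.pairwise_cons.mp hp with ⟨h1, h2⟩
    by_cases hy : (y == x) = true
    · simp only [List.dropWhile_cons, hy, if_true]
      exact ih h2 (fun z hz => hge z (List.mem_cons_of_mem y hz))
    · have hyf : (y == x) = false := by simpa using hy
      simp only [List.dropWhile_cons, hyf, Bool.false_eq_true, if_false]
      intro hmem
      have hxy : x < y :=
        lt_of_le_of_ne (hge y (List.mem_cons_self))
          (fun h => hy (by simp [h.symm]))
      rcases List.mem_cons.mp hmem with rfl | hmem
      · exact absurd rfl (ne_of_gt hxy)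
      · exact absurd rfl (ne_of_gt (lt_of_lt_of_le hxy (h1 x hmem)))

-- run-length scan over a sorted list = the distinct elements with their counts
theorem runs_spec : ∀ (n : Nat) (S : List String), S.length ≤ n → S.Pairwise (· ≤ ·) →
    pvRuns S = (PySem.Set.ofList S).map
      (fun k => k ++ " " ++ PySem.Int.toStr ((S.count k : Nat) : Int)) := by
  intro n
  induction n with
  | zero =>
    intro S hlen _
    have : S = [] := List.eq_nil_of_length_eq_zero (Nat.le_zero.mp hlen)
    subst this
    simp [pvRuns, PySem.Set.ofList_nil]
  | succ n ih =>
    intro S hlen hp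
    match S with
    | [] => simp [pvRuns, PySem.Set.ofList_nil]
    | x :: t =>
      rcases List.pairwise_cons.mp hp with ⟨hx, hpt⟩
      have htw_all : ∀ y ∈ t.takeWhile (fun y => y == x), y = x := by
        intro y hy
        have := List.mem_takeWhile_imp hy
        simpa using this
      have htd_sub : (t.dropWhile (fun y => y == x)).Sublist t := List.dropWhile_sublist _
      have htd_pair : (t.dropWhile (fun y => y == x)).Pairwise (· ≤ ·) :=
        List.Pairwise.sublist htd_sub hpt
      have hx_notin : x ∉ t.dropWhile (fun y => y == x) := not_mem_dropWhile_self x t hpt hx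
      have hsplit : t.takeWhile (fun y => y == x) ++ t.dropWhile (fun y => y == x) = t :=
        List.takeWhile_append_dropWhile
      -- Set.ofList (x :: t) = x :: Set.ofList (dropWhile)
      have hset : PySem.Set.ofList (x :: t) =
          x :: PySem.Set.ofList (t.dropWhile (fun y => y == x)) := by
        apply eq_of_perm_pairwise_lt (fun y => y) _ _
        · rw [List.perm_ext_iff_of_nodup (PySem.Set.nodup_ofList _) ?nd]
          case nd =>
            refine List.nodup_cons.mpr ⟨?_, PySem.Set.nodup_ofList _⟩
            rw [PySem.Set.mem_ofList]; exact hx_notin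
          intro a
          simp only [PySem.Set.mem_ofList, List.mem_cons]
          constructor
          · rintro (rfl | ha)
            · exact Or.inl rfl
            · rw [← hsplit] at ha
              rcases List.mem_append.mp ha with ha | ha
              · exact Or.inl (htw_all a ha)
              · exact Or.inr ha
          · rintro (rfl | ha)
            · exact Or.inl rfl
            · exact Or.inr (htd_sub.subset ha)
        · exact pairwise_lt_of_le_nodup (fun y => y) _
            (List.Pairwise.sublist (ofList_sublist _) hp)
            (by simpa using PySem.Set.nodup_ofList (x :: t))
        · refine pairwise_lt_of_le_nodup (fun y => y) _ ?_ ?_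
          · refine List.pairwise_cons.mpr
              ⟨?_, List.Pairwise.sublist (ofList_sublist _) htd_pair⟩
            intro z hz
            exact hx z (htd_sub.subset ((PySem.Set.mem_ofList _ z).mp hz))
          · simp only [List.map_id']
            refine List.nodup_cons.mpr ⟨?_, PySem.Set.nodup_ofList _⟩
            rw [PySem.Set.mem_ofList]; exact hx_notin
      -- count of the head
      have hcount_head : (x :: t).count x = (t.takeWhile (fun y => y == x)).length + 1 := by
        rw [List.count_cons_self]
        have hcat : (t.takeWhile (fun y => y == x) ++ t.dropWhile (fun y => y == x)).count x =
            (t.takeWhile (fun y => y == x)).count x +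
              (t.dropWhile (fun y => y == x)).count x := by
          rw [List.count_append]
        rw [hsplit] at hcat
        have h1 : (t.takeWhile (fun y => y == x)).count x =
            (t.takeWhile (fun y => y == x)).length :=
          List.count_eq_length.mpr (fun b hb => by simp [htw_all b hb])
        have h2 : (t.dropWhile (fun y => y == x)).count x = 0 :=
          List.count_eq_zero.mpr hx_notin
        omega
      -- counts of the other labels
      have hcount_rest : ∀ k ∈ PySem.Set.ofList (t.dropWhile (fun y => y == x)),
          (x :: t).count k = (t.dropWhile (fun y => y == x)).count k := by
        intro k hk
        rw [PySem.Set.mem_ofList] at hk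
        have hkx : k ≠ x := fun h => hx_notin (h ▸ hk)
        have hstep : (x :: t).count k = t.count k := by
          simp [List.count_cons, Ne.symm hkx]
        have hcat : (t.takeWhile (fun y => y == x) ++ t.dropWhile (fun y => y == x)).count k =
            (t.takeWhile (fun y => y == x)).count k +
              (t.dropWhile (fun y => y == x)).count k := by
          rw [List.count_append]
        rw [hsplit] at hcat
        have h1 : (t.takeWhile (fun y => y == x)).count k = 0 :=
          List.count_eq_zero.mpr (fun hmem => hkx (htw_all k hmem))
        omega
      have hlen' : (t.dropWhile (fun y => y == x)).length ≤ n := by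
        have hsl := htd_sub.length_le
        simp only [List.length_cons] at hlen
        omega
      rw [pvRuns, hset, List.map_cons, ih _ hlen' htd_pair]
      congr 1
      · rw [hcount_head]; push_cast; ring_nf
      · apply List.map_congr_left
        intro k hk
        rw [hcount_rest k hk]

-- sorted tuple items of the counter = sorted distinct labels paired with their counts
theorem sorted_items_counter (L : List String) :
    PySem.List.sorted2 (PySem.Dict.counter L).items (fun kc => kc.1) (fun kc => kc.2) =
      (PySem.List.sorted (PySem.Set.ofList L) (fun x => x)).map
        (fun k => (k, (L.count k : Int))) := by
  have hkeys : (PySem.Dict.counter L).items.map (fun kc => kc.1) = PySem.Set.ofList L := by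
    rw [PySem.Dict.items_counter, List.map_map]
    simp [Function.comp_def]
  apply eq_of_perm_pairwise_lt (fun kc : String × Int => kc.1)
  · -- both sides are permutations of the counter's items
    have h1 : (PySem.List.sorted2 (PySem.Dict.counter L).items (fun kc => kc.1)
        (fun kc => kc.2)).Perm (PySem.Dict.counter L).items :=
      PySem.List.sorted2_perm _ _ _ _
    have h2 : ((PySem.List.sorted (PySem.Set.ofList L) (fun x => x)).map
        (fun k => (k, (L.count k : Int)))).Perm (PySem.Dict.counter L).items := by
      rw [PySem.Dict.items_counter]
      exact (PySem.List.sorted_perm _ _ _).map _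
    exact h1.trans h2.symm
  · -- left side: pairwise ≤ on fst, and fst-keys nodup (perm of the counter's keys)
    refine pairwise_lt_of_le_nodup _ _ (sorted2_fst_pairwise _) ?_
    have hperm : ((PySem.List.sorted2 (PySem.Dict.counter L).items (fun kc => kc.1)
        (fun kc => kc.2)).map (fun kc => kc.1)).Perm
        ((PySem.Dict.counter L).items.map (fun kc => kc.1)) :=
      (PySem.List.sorted2_perm _ _ _ _).map _
    refine hperm.nodup_iff.mpr ?_
    rw [hkeys]
    exact PySem.Set.nodup_ofList L
  · -- right side: strictly increasing fst by construction
    have := PySem.List.sorted_ofList_pairwise_lt L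
    rw [List.pairwise_map]
    exact this

-- the two ports agree on every input
theorem ports_agree (rows : List (List (String × String))) :
    event_count_text_py rows = event_count_text_py_alt rows := by
  unfold event_count_text_py event_count_text_py_alt
  by_cases hr : rows = []
  · subst hr; rfl
  · have hL : rows.map pvLabel ≠ [] := by simpa using hr
    have hS : PySem.List.sorted (rows.map pvLabel) (fun x => x) ≠ [] := by
      rw [Ne, PySem.List.sorted_eq_nil_iff]; exact hL
    rw [if_neg hr, if_neg hS]
    have hlen : (PySem.List.sorted (rows.map pvLabel) (fun x => x)).length = rows.length := by
      rw [PySem.List.length_sorted, List.length_map]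
    rw [hlen]
    congr 1
    -- remaining: the joined parts agree
    have hfold : rows.foldl
        (fun d row => d.insert (pvLabel row) (d.getD (pvLabel row) 0 + 1))
        (PySem.Dict.empty : PySem.Dict String Int) =
        PySem.Dict.counter (rows.map pvLabel) := by
      rw [← PySem.Dict.foldl_insert_getD_add_one_eq_counter, List.foldl_map]
    rw [hfold, sorted_items_counter, List.map_map]
    have hcnt : ∀ k, (rows.map pvLabel).count k =
        (PySem.List.sorted (rows.map pvLabel) (fun x => x)).count k :=
      fun k => ((PySem.List.sorted_perm (rows.map pvLabel) (fun x => x) false).count_eq k).symm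
    have hrw : ((PySem.List.sorted (PySem.Set.ofList (rows.map pvLabel)) (fun x => x)).map
        ((fun kc : String × Int => kc.1 ++ " " ++ PySem.Int.toStr kc.2) ∘
          (fun k => (k, ((rows.map pvLabel).count k : Int))))) =
        pvRuns (PySem.List.sorted (rows.map pvLabel) (fun x => x)) := by
      rw [sorted_ofList_eq_ofList_sorted]
      rw [runs_spec (PySem.List.sorted (rows.map pvLabel) (fun x => x)).length _ (le_refl _)
        (PySem.List.sorted_pairwise _ _)]
      apply List.map_congr_left
      intro k _
      simp only [Function.comp]
      rw [hcnt k]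
    rw [hrw]

-- ===== VERDICT (by name: the statement is the Claim_ definition above) =====
theorem event_count_text_py_spec : Claim_equal_event_count_text_py := by
  intro rows _
  unfold Spec_event_count_text_py
  exact ports_agree rows
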